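-- pv_equiv track=rewrite | github.com/OPJMT/python_intro | les_5_errol/.venv/l5_vraag_3.py | check_horizontals
-- ===== SOURCE A (Python) =====
-- def check_horizontals(locations):
--     prev = locations[0]
--     x = 1
--     for i in locations[1:]:
--         if i[0] == prev[0]:
--             x += 1
--             prev = i
--             if x == 4:
--                 return "Horizontal Bingo!"
--         else:
--             prev = i
--             x = 1
-- ===== SOURCE B (Python) =====
-- def check_horizontals(locations):
--     n = len(locations)
--     for i in range(n - 3):
--         if locations[i][0] == locations[i + 1][0] == locations[i + 2][0] == locations[i + 3][0]:
--             return "Horizontal Bingo!"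
-- ===== Notes on version B (the rewrite author's own statement) =====
-- stated objective: simpler
-- what changed: Replaces A's run-length state machine (prev element + counter reset on key change) by a stateless sliding-window scan that checks each window of 4 consecutive elements for equal first coordinates.
import Mathlib
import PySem

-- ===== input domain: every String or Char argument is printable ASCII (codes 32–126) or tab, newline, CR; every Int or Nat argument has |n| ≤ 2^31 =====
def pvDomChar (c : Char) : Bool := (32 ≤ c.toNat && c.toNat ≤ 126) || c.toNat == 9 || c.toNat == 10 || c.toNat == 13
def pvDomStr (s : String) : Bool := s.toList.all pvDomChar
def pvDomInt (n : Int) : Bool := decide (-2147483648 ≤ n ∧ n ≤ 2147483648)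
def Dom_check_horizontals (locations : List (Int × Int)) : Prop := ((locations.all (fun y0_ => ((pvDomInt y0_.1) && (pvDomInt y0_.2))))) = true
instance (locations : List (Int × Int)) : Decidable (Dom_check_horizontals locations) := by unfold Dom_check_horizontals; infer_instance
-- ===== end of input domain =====

-- B replaces A's run-length state machine by a stateless sliding-window scan (simpler).
-- ===== PORT A =====
-- the for-loop over locations[1:] with state (prev, x) and an early return
def chLoopA : (Int × Int) → Int → List (Int × Int) → Option String
  | _, _, [] => none
  | prev, x, i :: rest =>
    if i.1 = prev.1 then
      if x + 1 = 4 then some "Horizontal Bingo!" else chLoopA i (x + 1) rest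
    else chLoopA i 1 rest

def check_horizontals (locations : List (Int × Int)) : Option String :=
  match locations with
  | [] => none   -- locations[0] raises IndexError here; excluded by Pre_
  | p :: rest => chLoopA p 1 rest

-- ===== PORT B =====
-- window test at index i: locations[i][0] == locations[i+1][0] == locations[i+2][0] == locations[i+3][0]
def winB (l : List (Int × Int)) (i : Nat) : Bool :=
  (l.getD i (0, 0)).1 == (l.getD (i + 1) (0, 0)).1 &&
  (l.getD (i + 1) (0, 0)).1 == (l.getD (i + 2) (0, 0)).1 &&
  (l.getD (i + 2) (0, 0)).1 == (l.getD (i + 3) (0, 0)).1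

def check_horizontals_alt (locations : List (Int × Int)) : Option String :=
  if (List.range (locations.length - 3)).any (winB locations) then some "Horizontal Bingo!"
  else none

-- ===== PRECONDITION & SPEC =====
-- Pre_ excludes only the empty list, on which A raises IndexError at locations[0].
def Pre_check_horizontals (locations : List (Int × Int)) : Prop := locations ≠ []
instance (locations : List (Int × Int)) : Decidable (Pre_check_horizontals locations) := by unfold Pre_check_horizontals; infer_instance
def pvWitness_check_horizontals : (List (Int × Int)) := [((0 : Int), (0 : Int))]

def Spec_check_horizontals (locations : List (Int × Int)) (out : Option String) : Prop := out = check_horizontals_alt locations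
instance (locations : List (Int × Int)) (out : Option String) : Decidable (Spec_check_horizontals locations out) := by unfold Spec_check_horizontals; infer_instance

-- ===== CLAIM (what is proved, stated in full; the proofs are below) =====
def Claim_equal_check_horizontals : Prop := ∀ (locations : List (Int × Int)), Dom_check_horizontals locations → Pre_check_horizontals locations → Spec_check_horizontals locations (check_horizontals locations)

-- ===== LEMMAS AND PROOFS =====
-- reference spec: there are 4 consecutive elements with equal first coordinates
def hasRun4 : List (Int × Int) → Bool
  | a :: b :: c :: d :: t => (a.1 == b.1 && b.1 == c.1 && c.1 == d.1) || hasRun4 (b :: c :: d :: t)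
  | _ => false

-- length of the maximal prefix with first coordinate v
def frl (v : Int) (l : List (Int × Int)) : Nat := (l.takeWhile (fun q => q.1 == v)).length

theorem frl_cons (v : Int) (a : Int × Int) (t : List (Int × Int)) :
    frl v (a :: t) = if a.1 = v then frl v t + 1 else 0 := by
  by_cases h : a.1 = v <;> simp [frl, h]

theorem frl_le (v : Int) (l : List (Int × Int)) : frl v l ≤ l.length := by
  induction l with
  | nil => simp [frl]
  | cons a t ih => rw [frl_cons]; split <;> simp <;> omega

theorem frl3_iff (p a b c : Int × Int) (t : List (Int × Int)) :
    3 ≤ frl p.1 (a :: b :: c :: t) ↔ (a.1 = p.1 ∧ b.1 = p.1 ∧ c.1 = p.1) := by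
  rw [frl_cons, frl_cons, frl_cons]
  by_cases h1 : a.1 = p.1 <;> by_cases h2 : b.1 = p.1 <;> by_cases h3 : c.1 = p.1 <;>
    simp [h1, h2, h3]

theorem hasRun4_cons (p : Int × Int) (rest : List (Int × Int)) :
    hasRun4 (p :: rest) = (decide (3 ≤ frl p.1 rest) || hasRun4 rest) := by
  match rest with
  | [] =>
    have := frl_le p.1 ([] : List (Int × Int))
    have h : ¬ 3 ≤ frl p.1 ([] : List (Int × Int)) := by simp at this; omega
    simp [hasRun4, h]
  | [a] =>
    have := frl_le p.1 [a]
    have h : ¬ 3 ≤ frl p.1 [a] := by simp at this; omega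
    simp [hasRun4, h]
  | [a, b] =>
    have := frl_le p.1 [a, b]
    have h : ¬ 3 ≤ frl p.1 [a, b] := by simp at this; omega
    simp [hasRun4, h]
  | a :: b :: c :: t =>
    show (_ || hasRun4 (a :: b :: c :: t)) = _
    congr 1
    rw [Bool.eq_iff_iff]
    simp only [Bool.and_eq_true, beq_iff_eq, decide_eq_true_eq, frl3_iff]
    constructor
    · rintro ⟨⟨h1, h2⟩, h3⟩
      exact ⟨h1.symm, h2.symm.trans h1.symm, h3.symm.trans (h2.symm.trans h1.symm)⟩
    · rintro ⟨h1, h2, h3⟩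
      exact ⟨⟨h1.symm, h1.trans h2.symm⟩, h2.trans h3.symm⟩

theorem chLoopA_eq (rest : List (Int × Int)) : ∀ (prev : Int × Int) (x : Int), 1 ≤ x → x ≤ 3 →
    chLoopA prev x rest =
      (if 4 ≤ x + (frl prev.1 rest : Int) then some "Horizontal Bingo!"
       else if hasRun4 rest then some "Horizontal Bingo!" else none) := by
  induction rest with
  | nil =>
    intro prev x h1 h3
    have : ¬ (4 : Int) ≤ x + ((frl prev.1 [] : Nat) : Int) := by
      have := frl_le prev.1 ([] : List (Int × Int)); simp at this
      rw [this]; push_cast; omega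
    simp only [chLoopA, hasRun4, if_neg this]
    simp
  | cons i t ih =>
    intro prev x h1 h3
    by_cases he : i.1 = prev.1
    · have hfrl : frl prev.1 (i :: t) = frl i.1 t + 1 := by
        rw [frl_cons, if_pos he, he]
      by_cases h4 : x + 1 = 4
      · have hge : (4 : Int) ≤ x + (frl prev.1 (i :: t) : Int) := by
          rw [hfrl]; push_cast; omega
        simp [chLoopA, he, h4, hge]
      · rw [show chLoopA prev x (i :: t) = chLoopA i (x + 1) t by
          simp [chLoopA, he, h4]]
        rw [ih i (x + 1) (by omega) (by omega)]
        rw [hasRun4_cons, hfrl]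
        by_cases hc : (4 : Int) ≤ x + 1 + (frl i.1 t : Int)
        · have hc2 : (4 : Int) ≤ x + ((frl i.1 t + 1 : Nat) : Int) := by push_cast; omega
          rw [if_pos hc, if_pos hc2]
        · have hnc : ¬ (4 : Int) ≤ x + ((frl i.1 t + 1 : Nat) : Int) := by
            push_cast at hc ⊢; omega
          have hlt : ¬ (3 ≤ frl i.1 t) := by
            intro h; apply hc; push_cast; omega
          rw [if_neg hc, if_neg hnc]
          simp [hlt]
    · have hfrl : frl prev.1 (i :: t) = 0 := by rw [frl_cons, if_neg he]
      rw [show chLoopA prev x (i :: t) = chLoopA i 1 t by simp [chLoopA, he]]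
      rw [ih i 1 (by omega) (by omega)]
      rw [hasRun4_cons, hfrl]
      have h0 : ¬ (4 : Int) ≤ x + ((0 : Nat) : Int) := by push_cast; omega
      rw [if_neg h0]
      by_cases hc : (4 : Int) ≤ 1 + (frl i.1 t : Int)
      · have : 3 ≤ frl i.1 t := by omega
        simp [hc, this]
      · have : ¬ 3 ≤ frl i.1 t := by omega
        simp [hc, this]

theorem portA_eq_hasRun4 (l : List (Int × Int)) (h : l ≠ []) :
    check_horizontals l = (if hasRun4 l then some "Horizontal Bingo!" else none) := by
  match l with
  | p :: rest =>
    rw [show check_horizontals (p :: rest) = chLoopA p 1 rest from rfl]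
    rw [chLoopA_eq rest p 1 (by omega) (by omega), hasRun4_cons]
    by_cases hc : 3 ≤ frl p.1 rest
    · have : (4 : Int) ≤ 1 + (frl p.1 rest : Int) := by push_cast; omega
      simp [hc, this]
    · have : ¬ (4 : Int) ≤ 1 + (frl p.1 rest : Int) := by push_cast; omega
      simp [hc, this]

theorem winB_cons (a : Int × Int) (t : List (Int × Int)) (i : Nat) :
    winB (a :: t) (i + 1) = winB t i := by
  rfl

theorem anyWin_eq_hasRun4 (l : List (Int × Int)) :
    (List.range (l.length - 3)).any (winB l) = hasRun4 l := by
  induction l with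
  | nil => simp [hasRun4]
  | cons a t ih =>
    match t, ih with
    | [], _ => simp [hasRun4]
    | [b], _ => simp [hasRun4]
    | [b, c], _ => simp [hasRun4]
    | b :: c :: d :: t', ih =>
      have hlen : (a :: b :: c :: d :: t').length - 3 = ((b :: c :: d :: t').length - 3) + 1 := by
        simp
      rw [hlen, List.range_succ_eq_map, List.any_cons, List.any_map]
      have hshift : ((List.range ((b :: c :: d :: t').length - 3)).any
          (winB (a :: b :: c :: d :: t') ∘ Nat.succ)) =
          (List.range ((b :: c :: d :: t').length - 3)).any (winB (b :: c :: d :: t')) := by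
        exact List.any_congr rfl (fun i => winB_cons a (b :: c :: d :: t') i)
      rw [hshift, ih]
      show (winB (a :: b :: c :: d :: t') 0 || hasRun4 (b :: c :: d :: t')) = hasRun4 (a :: b :: c :: d :: t')
      rw [show hasRun4 (a :: b :: c :: d :: t') = ((a.1 == b.1 && b.1 == c.1 && c.1 == d.1) || hasRun4 (b :: c :: d :: t')) from rfl]
      congr 1

-- ===== VERDICT (by name: the statement is the Claim_ definition above) =====
theorem check_horizontals_spec : Claim_equal_check_horizontals := by
  intro l _ hpre
  show check_horizontals l = check_horizontals_alt l
  rw [portA_eq_hasRun4 l hpre]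
  unfold check_horizontals_alt
  rw [anyWin_eq_hasRun4]
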